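-- pv_equiv track=rewrite | github.com/qldrh112/qldrh112 | ssafy/algorithm/20240202/16268.py | ballon_pang2
-- ===== SOURCE A (Python) =====
-- def ballon_pang2(N, M, matrix):
--     """
--     :param N: 세로길이(col)
--     :param M: 가로길이(row)
--     :param matrix: 풍선판의 2차원 배열
--     :return: 날릴 수 있는 꽂가루 수 중 최대값
--     """
--     # 왼, 오, 위, 아래
--     four_way = [[0, -1], [0, 1], [-1, 0], [1, 0]]
--     max_v = 0
--
--     for col in range(N):
--         for row in range(M):
--             pollen = matrix[col][row]
--             for x in range(4):
--                 di, dj = four_way[x]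
--                 # out of range
--                 if 0 <= col + di < N and 0 <= row + dj < M:
--                     pollen += matrix[col+di][row+dj]
--             if max_v < pollen:
--                 max_v = pollen
--
--     return max_v
-- ===== SOURCE B (Python) =====
-- def ballon_pang2(N, M, matrix):
--     # Staged prefix-sum version: precompute row/column prefix sums, then each
--     # cell's plus-shaped sum is clipped-vertical + clipped-horizontal - center.
--     if N <= 0 or M <= 0:
--         return 0
--     rows = [matrix[c][:M] for c in range(N)]
--
--     def pref(xs):
--         p = [0]
--         for v in xs:
--             p.append(p[-1] + v)
--         return p
--
--     RP = [pref(rows[c]) for c in range(N)]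
--     CP = [pref([rows[c][r] for c in range(N)]) for r in range(M)]
--     max_v = 0
--     for c in range(N):
--         for r in range(M):
--             vert = CP[r][min(c + 1, N - 1) + 1] - CP[r][max(c - 1, 0)]
--             hor = RP[c][min(r + 1, M - 1) + 1] - RP[c][max(r - 1, 0)]
--             pollen = vert + hor - rows[c][r]
--             if max_v < pollen:
--                 max_v = pollen
--     return max_v
-- ===== Notes on version B (the rewrite author's own statement) =====
-- stated objective: alternative
-- what changed: Replaces A's per-cell direction loop with bounds checks by staged passes: row and column prefix-sum tables are precomputed once, and each cell's plus-shaped sum is obtained as clipped-vertical-window + clipped-horizontal-window - center via two prefix-sum differences.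
import Mathlib
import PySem

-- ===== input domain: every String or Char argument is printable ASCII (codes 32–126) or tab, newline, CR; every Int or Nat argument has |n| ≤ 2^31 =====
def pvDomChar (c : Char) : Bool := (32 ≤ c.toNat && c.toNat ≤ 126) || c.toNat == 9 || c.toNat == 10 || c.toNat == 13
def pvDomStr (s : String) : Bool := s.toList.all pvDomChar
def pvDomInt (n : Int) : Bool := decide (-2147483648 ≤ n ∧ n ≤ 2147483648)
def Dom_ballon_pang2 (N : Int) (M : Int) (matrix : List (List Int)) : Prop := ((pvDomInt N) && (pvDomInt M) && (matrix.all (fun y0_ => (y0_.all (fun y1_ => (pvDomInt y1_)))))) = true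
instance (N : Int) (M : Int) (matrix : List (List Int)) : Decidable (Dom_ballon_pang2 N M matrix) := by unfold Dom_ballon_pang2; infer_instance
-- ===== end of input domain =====

-- B replaces A's per-cell direction loop by staged row/column prefix-sum tables; equivalence proved on Pre_.
-- ===== PORT A =====
-- matrix[i][j]; exact wherever the indices are in range (Pre_ guarantees this for every access A makes).
def aGet (matrix : List (List Int)) (i j : Int) : Int :=
  PySem.List.pyGetD (PySem.List.pyGetD matrix i []) j 0

def ballon_pang2 (N : Int) (M : Int) (matrix : List (List Int)) : Int :=
  let four_way : List (Int × Int) := [(0, -1), (0, 1), (-1, 0), (1, 0)]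
  (PySem.List.pyRange 0 N 1).foldl (fun max_v col =>
    (PySem.List.pyRange 0 M 1).foldl (fun max_v row =>
      let pollen := four_way.foldl (fun pollen d =>
        if 0 ≤ col + d.1 ∧ col + d.1 < N ∧ 0 ≤ row + d.2 ∧ row + d.2 < M then
          pollen + aGet matrix (col + d.1) (row + d.2)
        else pollen) (aGet matrix col row)
      if max_v < pollen then pollen else max_v) max_v) 0

-- ===== PORT B =====
-- pref(xs): p = [0]; for v in xs: p.append(p[-1] + v)
def bPref (xs : List Int) : List Int :=
  xs.foldl (fun p v => p ++ [p.getLastD 0 + v]) [0]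

-- rows = [matrix[c][:M] for c in range(N)]
def bRows (N : Int) (M : Int) (matrix : List (List Int)) : List (List Int) :=
  (PySem.List.pyRange 0 N 1).map (fun c => PySem.List.slice (PySem.List.pyGetD matrix c []) none (some M))

-- [rows[c][r] for c in range(N)]
def bCol (N : Int) (rows : List (List Int)) (r : Int) : List Int :=
  (PySem.List.pyRange 0 N 1).map (fun c => PySem.List.pyGetD (PySem.List.pyGetD rows c []) r 0)

def ballon_pang2_alt (N : Int) (M : Int) (matrix : List (List Int)) : Int :=
  if N ≤ 0 ∨ M ≤ 0 then 0 else
  let rows := bRows N M matrix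
  let RP := (PySem.List.pyRange 0 N 1).map (fun c => bPref (PySem.List.pyGetD rows c []))
  let CP := (PySem.List.pyRange 0 M 1).map (fun r => bPref (bCol N rows r))
  (PySem.List.pyRange 0 N 1).foldl (fun max_v c =>
    (PySem.List.pyRange 0 M 1).foldl (fun max_v r =>
      let vert := PySem.List.pyGetD (PySem.List.pyGetD CP r []) (min (c + 1) (N - 1) + 1) 0
                  - PySem.List.pyGetD (PySem.List.pyGetD CP r []) (max (c - 1) 0) 0
      let hor := PySem.List.pyGetD (PySem.List.pyGetD RP c []) (min (r + 1) (M - 1) + 1) 0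
                 - PySem.List.pyGetD (PySem.List.pyGetD RP c []) (max (r - 1) 0) 0
      let pollen := vert + hor - PySem.List.pyGetD (PySem.List.pyGetD rows c []) r 0
      if max_v < pollen then pollen else max_v) max_v) 0

-- ===== PRECONDITION & SPEC =====
-- Pre_ excludes exactly the inputs where A raises IndexError: when M > 0 the loops read
-- matrix[col][row] for all 0 ≤ col < N, 0 ≤ row < M, so matrix needs at least N rows and
-- the first N rows need at least M entries; when M ≤ 0 nothing is read and A is total.
def Pre_ballon_pang2 (N : Int) (M : Int) (matrix : List (List Int)) : Prop :=
  0 < M → (N ≤ (matrix.length : Int) ∧ ∀ r ∈ matrix.take N.toNat, M ≤ (r.length : Int))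
instance (N : Int) (M : Int) (matrix : List (List Int)) : Decidable (Pre_ballon_pang2 N M matrix) := by
  unfold Pre_ballon_pang2; infer_instance
def pvWitness_ballon_pang2 : Int × Int × List (List Int) := (2, 3, [[1, 2, 3], [4, -5, 6]])

def Spec_ballon_pang2 (N : Int) (M : Int) (matrix : List (List Int)) (out : Int) : Prop := out = ballon_pang2_alt N M matrix
instance (N : Int) (M : Int) (matrix : List (List Int)) (out : Int) : Decidable (Spec_ballon_pang2 N M matrix out) := by unfold Spec_ballon_pang2; infer_instance

-- ===== CLAIM (what is proved, stated in full; the proofs are below) =====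
def Claim_equal_ballon_pang2 : Prop := ∀ (N : Int) (M : Int) (matrix : List (List Int)), Dom_ballon_pang2 N M matrix → Pre_ballon_pang2 N M matrix → Spec_ballon_pang2 N M matrix (ballon_pang2 N M matrix)

-- ===== LEMMAS AND PROOFS =====
-- prefix sums, mathematically: pvSums a xs = [a, a+xs[0], a+xs[0]+xs[1], ...]
def pvSums (a : Int) : List Int → List Int
  | [] => [a]
  | x :: xs => a :: pvSums (a + x) xs

theorem foldl_bPref (xs : List Int) : ∀ (acc : List Int) (a : Int),
    xs.foldl (fun p v => p ++ [p.getLastD 0 + v]) (acc ++ [a]) = acc ++ pvSums a xs := by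
  induction xs with
  | nil => intro acc a; simp [pvSums]
  | cons x xs ih =>
    intro acc a
    have hlast : (acc ++ [a]).getLastD 0 = a := by
      simp [List.getLastD_eq_getLast?, List.getLast?_append]
    simp only [List.foldl_cons, hlast, pvSums]
    rw [ih (acc ++ [a]) (a + x)]
    simp

theorem bPref_eq (xs : List Int) : bPref xs = pvSums 0 xs := by
  have := foldl_bPref xs [] 0
  simpa [bPref] using this

theorem pvSums_getD : ∀ (xs : List Int) (a : Int) (k : Nat), k ≤ xs.length →
    (pvSums a xs).getD k 0 = a + (xs.take k).sum := by
  intro xs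
  induction xs with
  | nil =>
    intro a k hk
    have hk0 : k = 0 := by simpa using hk
    subst hk0; simp [pvSums]
  | cons x xs ih =>
    intro a k hk
    cases k with
    | zero => simp [pvSums]
    | succ k =>
      simp only [pvSums, List.getD_cons_succ, List.take_succ_cons, List.sum_cons]
      rw [ih (a + x) k (by simpa using hk)]
      ring

theorem bPref_pyGetD (xs : List Int) (k : Int) (h0 : 0 ≤ k) (hk : k.toNat ≤ xs.length) :
    PySem.List.pyGetD (bPref xs) k 0 = (xs.take k.toNat).sum := by
  obtain ⟨n, rfl⟩ : ∃ n : Nat, k = (n : Int) := ⟨k.toNat, by omega⟩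
  rw [PySem.List.pyGetD_natCast, bPref_eq, pvSums_getD _ _ _ (by simpa using hk)]
  simp

-- prefix-sum differences over windows of 1, 2, 3 cells
theorem segd1 (l : List Int) (a : Nat) (h : a < l.length) :
    (l.take (a + 1)).sum - (l.take a).sum = l[a] := by
  rw [List.sum_take_succ _ _ h]; ring

theorem segd2 (l : List Int) (a : Nat) (h : a + 1 < l.length) :
    (l.take (a + 2)).sum - (l.take a).sum = l[a] + l[a + 1] := by
  have e2 : (l.take (a + 2)).sum = (l.take (a + 1)).sum + l[a + 1] := by
    simpa using List.sum_take_succ l (a + 1) h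
  have e1 : (l.take (a + 1)).sum = (l.take a).sum + l[a] := by
    simpa using List.sum_take_succ l a (by omega)
  rw [e2, e1]; ring

theorem segd3 (l : List Int) (a : Nat) (h : a + 2 < l.length) :
    (l.take (a + 3)).sum - (l.take a).sum = l[a] + l[a + 1] + l[a + 2] := by
  have e3 : (l.take (a + 3)).sum = (l.take (a + 2)).sum + l[a + 2] := by
    simpa using List.sum_take_succ l (a + 2) h
  have e2 : (l.take (a + 2)).sum = (l.take (a + 1)).sum + l[a + 1] := by
    simpa using List.sum_take_succ l (a + 1) (by omega)
  have e1 : (l.take (a + 1)).sum = (l.take a).sum + l[a] := by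
    simpa using List.sum_take_succ l a (by omega)
  rw [e3, e2, e1]; ring

-- rows[c] = matrix[c][:M]
theorem rows_get (N M : Int) (matrix : List (List Int))
    (h1 : N ≤ (matrix.length : Int)) (hM : 0 ≤ M)
    (c : Int) (hc : 0 ≤ c) (hcN : c < N) :
    PySem.List.pyGetD (bRows N M matrix) c [] = (matrix.getD c.toNat []).take M.toNat := by
  obtain ⟨cn, rfl⟩ : ∃ n : Nat, c = (n : Int) := ⟨c.toNat, by omega⟩
  obtain ⟨Nn, rfl⟩ : ∃ n : Nat, N = (n : Int) := ⟨N.toNat, by omega⟩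
  rw [bRows, PySem.List.pyGetD_map_pyRange _ Nn cn _ (by omega)]
  rw [PySem.List.pyGetD_natCast, PySem.List.slice_to _ hM]
  simp

theorem aGet_eq_getD (matrix : List (List Int)) (c r : Int) (hc : 0 ≤ c) (hr : 0 ≤ r) :
    aGet matrix c r = (matrix.getD c.toNat []).getD r.toNat 0 := by
  obtain ⟨cn, rfl⟩ : ∃ n : Nat, c = (n : Int) := ⟨c.toNat, by omega⟩
  obtain ⟨rn, rfl⟩ : ∃ n : Nat, r = (n : Int) := ⟨r.toNat, by omega⟩
  rw [aGet, PySem.List.pyGetD_natCast, PySem.List.pyGetD_natCast]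
  simp

-- the per-cell read of B's rows table equals A's matrix read
theorem cell_get (N M : Int) (matrix : List (List Int))
    (h1 : N ≤ (matrix.length : Int))
    (h2 : ∀ r ∈ matrix.take N.toNat, M ≤ (r.length : Int))
    (c r : Int) (hc : 0 ≤ c) (hcN : c < N) (hr : 0 ≤ r) (hrM : r < M) :
    PySem.List.pyGetD (PySem.List.pyGetD (bRows N M matrix) c []) r 0 = aGet matrix c r := by
  obtain ⟨cn, rfl⟩ : ∃ n : Nat, c = (n : Int) := ⟨c.toNat, by omega⟩
  obtain ⟨rn, rfl⟩ : ∃ n : Nat, r = (n : Int) := ⟨r.toNat, by omega⟩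
  have hct : cn < matrix.length := by omega
  have hn : N.toNat ≤ matrix.length := by omega
  have hmem : matrix[cn] ∈ matrix.take N.toNat :=
    List.mem_take_iff_getElem.2
      ⟨cn, by simpa [Nat.min_eq_left hn] using (show cn < N.toNat by omega), by simp⟩
  have hrow : M ≤ ((matrix[cn]).length : Int) := h2 _ hmem
  rw [rows_get N M matrix h1 (by omega) _ hc hcN, PySem.List.pyGetD_natCast,
    aGet_eq_getD matrix _ _ hc hr]
  simp only [Int.toNat_natCast]
  rw [List.getD_eq_getElem _ _ hct]
  simp only [List.getD_eq_getElem?_getD, List.getElem?_take]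
  rw [if_pos (by omega : rn < M.toNat)]

theorem col_length (N : Int) (rows : List (List Int)) (r : Int) :
    (bCol N rows r).length = (N - 0).toNat := by
  unfold bCol
  rw [List.length_map, PySem.List.length_pyRange_one]

theorem col_get (N M : Int) (matrix : List (List Int))
    (h1 : N ≤ (matrix.length : Int))
    (h2 : ∀ r ∈ matrix.take N.toNat, M ≤ (r.length : Int))
    (r : Int) (hr : 0 ≤ r) (hrM : r < M) (k : Nat) (hk : (k : Int) < N)
    (hlen : k < (bCol N (bRows N M matrix) r).length) :
    (bCol N (bRows N M matrix) r)[k] = aGet matrix (k : Int) r := by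
  unfold bCol at hlen ⊢
  rw [List.getElem_map, PySem.List.getElem_pyRange_one]
  simp only [zero_add]
  exact cell_get N M matrix h1 h2 (k : Int) r (by omega) hk hr hrM

theorem row_get (N M : Int) (matrix : List (List Int))
    (h1 : N ≤ (matrix.length : Int))
    (h2 : ∀ r ∈ matrix.take N.toNat, M ≤ (r.length : Int))
    (c : Int) (hc : 0 ≤ c) (hcN : c < N) (k : Nat) (hk : (k : Int) < M)
    (hlen : k < (PySem.List.pyGetD (bRows N M matrix) c []).length) :
    (PySem.List.pyGetD (bRows N M matrix) c [])[k] = aGet matrix c (k : Int) := by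
  rw [← List.getD_eq_getElem _ 0 hlen, ← PySem.List.pyGetD_natCast]
  exact cell_get N M matrix h1 h2 c (k : Int) hc hcN (by omega) hk

theorem row_length (N M : Int) (matrix : List (List Int))
    (h1 : N ≤ (matrix.length : Int))
    (h2 : ∀ r ∈ matrix.take N.toNat, M ≤ (r.length : Int))
    (c : Int) (hc : 0 ≤ c) (hcN : c < N) (hM : 0 < M) :
    (PySem.List.pyGetD (bRows N M matrix) c []).length = M.toNat := by
  have hct : c.toNat < matrix.length := by omega
  have hn : N.toNat ≤ matrix.length := by omega
  have hmem : matrix[c.toNat] ∈ matrix.take N.toNat :=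
    List.mem_take_iff_getElem.2
      ⟨c.toNat, by simpa [Nat.min_eq_left hn] using (show c.toNat < N.toNat by omega), by simp⟩
  have hrow : M ≤ ((matrix[c.toNat]).length : Int) := h2 _ hmem
  rw [rows_get N M matrix h1 (by omega) c hc hcN, List.length_take,
    List.getD_eq_getElem _ _ hct]
  omega

-- the clipped vertical window read off the column prefix sums
theorem vert_eq (N M : Int) (matrix : List (List Int))
    (h1 : N ≤ (matrix.length : Int))
    (h2 : ∀ r ∈ matrix.take N.toNat, M ≤ (r.length : Int))
    (c r : Int) (hc : 0 ≤ c) (hcN : c < N) (hr : 0 ≤ r) (hrM : r < M) :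
    PySem.List.pyGetD (bPref (bCol N (bRows N M matrix) r)) (min (c + 1) (N - 1) + 1) 0
      - PySem.List.pyGetD (bPref (bCol N (bRows N M matrix) r)) (max (c - 1) 0) 0
    = (if 1 ≤ c then aGet matrix (c - 1) r else 0) + aGet matrix c r
      + (if c + 1 < N then aGet matrix (c + 1) r else 0) := by
  set l := bCol N (bRows N M matrix) r with hl
  have hlen : l.length = N.toNat := by rw [hl, col_length]; omega
  have hget : ∀ (k : Nat), (k : Int) < N → ∀ (hlen' : k < l.length),
      l[k] = aGet matrix (k : Int) r := by
    intro k hk hlen'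
    exact col_get N M matrix h1 h2 r hr hrM k hk hlen'
  rw [bPref_pyGetD l _ (by omega) (by omega), bPref_pyGetD l _ (by omega) (by omega)]
  by_cases hc1 : 1 ≤ c <;> by_cases hc2 : c + 1 < N
  · -- interior: window of 3 starting at c-1
    rw [show (min (c + 1) (N - 1) + 1).toNat = (c - 1).toNat + 3 from by omega,
      show (max (c - 1) 0).toNat = (c - 1).toNat from by omega,
      segd3 l _ (by omega),
      hget (c - 1).toNat (by omega) (by omega), hget ((c - 1).toNat + 1) (by omega) (by omega),
      hget ((c - 1).toNat + 2) (by omega) (by omega),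
      show (((c - 1).toNat : Nat) : Int) = c - 1 from by omega,
      show ((((c - 1).toNat + 1 : Nat)) : Int) = c from by omega,
      show ((((c - 1).toNat + 2 : Nat)) : Int) = c + 1 from by omega,
      if_pos hc1, if_pos hc2]
  · -- bottom edge: c = N-1 ≥ 1, window of 2 starting at c-1
    rw [show (min (c + 1) (N - 1) + 1).toNat = (c - 1).toNat + 2 from by omega,
      show (max (c - 1) 0).toNat = (c - 1).toNat from by omega,
      segd2 l _ (by omega),
      hget (c - 1).toNat (by omega) (by omega), hget ((c - 1).toNat + 1) (by omega) (by omega),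
      show (((c - 1).toNat : Nat) : Int) = c - 1 from by omega,
      show ((((c - 1).toNat + 1 : Nat)) : Int) = c from by omega,
      if_pos hc1, if_neg hc2]
    ring
  · -- top edge: c = 0, N ≥ 2, window of 2 starting at 0
    rw [show (min (c + 1) (N - 1) + 1).toNat = 0 + 2 from by omega,
      show (max (c - 1) 0).toNat = 0 from by omega,
      segd2 l _ (by omega), hget 0 (by omega) (by omega), hget 1 (by omega) (by omega),
      show ((0 : Nat) : Int) = c from by omega, show ((1 : Nat) : Int) = c + 1 from by omega,
      if_neg hc1, if_pos hc2]
    ring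
  · -- single row: c = 0, N = 1
    rw [show (min (c + 1) (N - 1) + 1).toNat = 0 + 1 from by omega,
      show (max (c - 1) 0).toNat = 0 from by omega,
      segd1 l _ (by omega), hget 0 (by omega) (by omega),
      show ((0 : Nat) : Int) = c from by omega, if_neg hc1, if_neg hc2]
    ring

-- the clipped horizontal window read off the row prefix sums
theorem hor_eq (N M : Int) (matrix : List (List Int))
    (h1 : N ≤ (matrix.length : Int))
    (h2 : ∀ r ∈ matrix.take N.toNat, M ≤ (r.length : Int))
    (c r : Int) (hc : 0 ≤ c) (hcN : c < N) (hr : 0 ≤ r) (hrM : r < M) :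
    PySem.List.pyGetD (bPref (PySem.List.pyGetD (bRows N M matrix) c [])) (min (r + 1) (M - 1) + 1) 0
      - PySem.List.pyGetD (bPref (PySem.List.pyGetD (bRows N M matrix) c [])) (max (r - 1) 0) 0
    = (if 1 ≤ r then aGet matrix c (r - 1) else 0) + aGet matrix c r
      + (if r + 1 < M then aGet matrix c (r + 1) else 0) := by
  set l := PySem.List.pyGetD (bRows N M matrix) c [] with hl
  have hlen : l.length = M.toNat := row_length N M matrix h1 h2 c hc hcN (by omega)
  have hget : ∀ (k : Nat), (k : Int) < M → ∀ (hlen' : k < l.length),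
      l[k] = aGet matrix c (k : Int) := by
    intro k hk hlen'
    exact row_get N M matrix h1 h2 c hc hcN k hk hlen'
  rw [bPref_pyGetD l _ (by omega) (by omega), bPref_pyGetD l _ (by omega) (by omega)]
  by_cases hr1 : 1 ≤ r <;> by_cases hr2 : r + 1 < M
  · rw [show (min (r + 1) (M - 1) + 1).toNat = (r - 1).toNat + 3 from by omega,
      show (max (r - 1) 0).toNat = (r - 1).toNat from by omega,
      segd3 l _ (by omega),
      hget (r - 1).toNat (by omega) (by omega), hget ((r - 1).toNat + 1) (by omega) (by omega),
      hget ((r - 1).toNat + 2) (by omega) (by omega),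
      show (((r - 1).toNat : Nat) : Int) = r - 1 from by omega,
      show ((((r - 1).toNat + 1 : Nat)) : Int) = r from by omega,
      show ((((r - 1).toNat + 2 : Nat)) : Int) = r + 1 from by omega,
      if_pos hr1, if_pos hr2]
  · rw [show (min (r + 1) (M - 1) + 1).toNat = (r - 1).toNat + 2 from by omega,
      show (max (r - 1) 0).toNat = (r - 1).toNat from by omega,
      segd2 l _ (by omega),
      hget (r - 1).toNat (by omega) (by omega), hget ((r - 1).toNat + 1) (by omega) (by omega),
      show (((r - 1).toNat : Nat) : Int) = r - 1 from by omega,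
      show ((((r - 1).toNat + 1 : Nat)) : Int) = r from by omega,
      if_pos hr1, if_neg hr2]
    ring
  · rw [show (min (r + 1) (M - 1) + 1).toNat = 0 + 2 from by omega,
      show (max (r - 1) 0).toNat = 0 from by omega,
      segd2 l _ (by omega), hget 0 (by omega) (by omega), hget 1 (by omega) (by omega),
      show ((0 : Nat) : Int) = r from by omega, show ((1 : Nat) : Int) = r + 1 from by omega,
      if_neg hr1, if_pos hr2]
    ring
  · rw [show (min (r + 1) (M - 1) + 1).toNat = 0 + 1 from by omega,
      show (max (r - 1) 0).toNat = 0 from by omega,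
      segd1 l _ (by omega), hget 0 (by omega) (by omega),
      show ((0 : Nat) : Int) = r from by omega, if_neg hr1, if_neg hr2]
    ring

-- CP[r] / RP[c] table reads
theorem CP_get (N M : Int) (matrix : List (List Int)) (r : Int) (hr : 0 ≤ r) (hrM : r < M) :
    PySem.List.pyGetD ((PySem.List.pyRange 0 M 1).map (fun r => bPref (bCol N (bRows N M matrix) r))) r []
      = bPref (bCol N (bRows N M matrix) r) := by
  obtain ⟨rn, rfl⟩ : ∃ n : Nat, r = (n : Int) := ⟨r.toNat, by omega⟩
  obtain ⟨Mn, rfl⟩ : ∃ n : Nat, M = (n : Int) := ⟨M.toNat, by omega⟩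
  exact PySem.List.pyGetD_map_pyRange _ Mn rn _ (by omega)

theorem RP_get (N M : Int) (matrix : List (List Int)) (c : Int) (hc : 0 ≤ c) (hcN : c < N) :
    PySem.List.pyGetD ((PySem.List.pyRange 0 N 1).map (fun c => bPref (PySem.List.pyGetD (bRows N M matrix) c []))) c []
      = bPref (PySem.List.pyGetD (bRows N M matrix) c []) := by
  obtain ⟨cn, rfl⟩ : ∃ n : Nat, c = (n : Int) := ⟨c.toNat, by omega⟩
  obtain ⟨Nn, rfl⟩ : ∃ n : Nat, N = (n : Int) := ⟨N.toNat, by omega⟩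
  exact PySem.List.pyGetD_map_pyRange _ Nn cn _ (by omega)

theorem pollen_eq (N M : Int) (matrix : List (List Int))
    (h1 : N ≤ (matrix.length : Int))
    (h2 : ∀ r ∈ matrix.take N.toNat, M ≤ (r.length : Int))
    (col row : Int) (hc : 0 ≤ col) (hcN : col < N) (hr : 0 ≤ row) (hrM : row < M) :
    List.foldl (fun pollen d =>
        if 0 ≤ col + d.1 ∧ col + d.1 < N ∧ 0 ≤ row + d.2 ∧ row + d.2 < M then
          pollen + aGet matrix (col + d.1) (row + d.2)
        else pollen) (aGet matrix col row) [((0:Int), (-1:Int)), (0, 1), (-1, 0), (1, 0)] =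
      (PySem.List.pyGetD (bPref (bCol N (bRows N M matrix) row)) (min (col + 1) (N - 1) + 1) 0
        - PySem.List.pyGetD (bPref (bCol N (bRows N M matrix) row)) (max (col - 1) 0) 0)
      + (PySem.List.pyGetD (bPref (PySem.List.pyGetD (bRows N M matrix) col [])) (min (row + 1) (M - 1) + 1) 0
        - PySem.List.pyGetD (bPref (PySem.List.pyGetD (bRows N M matrix) col [])) (max (row - 1) 0) 0)
      - PySem.List.pyGetD (PySem.List.pyGetD (bRows N M matrix) col []) row 0 := by
  rw [vert_eq N M matrix h1 h2 col row hc hcN hr hrM,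
    hor_eq N M matrix h1 h2 col row hc hcN hr hrM,
    cell_get N M matrix h1 h2 col row hc hcN hr hrM]
  simp only [List.foldl_cons, List.foldl_nil]
  have step : ∀ (C : Prop) [Decidable C] (x A : Int), (if C then x + A else x) = x + (if C then A else 0) := by
    intro C _ x A; split_ifs <;> ring
  rw [step, step, step, step]
  have g2 : (if 0 ≤ col + 0 ∧ col + 0 < N ∧ 0 ≤ row + -1 ∧ row + -1 < M then
        aGet matrix (col + 0) (row + -1) else 0) =
      (if 1 ≤ row then aGet matrix col (row - 1) else 0) := by
    rw [show col + 0 = col from by ring, show row + -1 = row - 1 from by ring]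
    exact if_congr (by omega) rfl rfl
  have g3 : (if 0 ≤ col + 0 ∧ col + 0 < N ∧ 0 ≤ row + 1 ∧ row + 1 < M then
        aGet matrix (col + 0) (row + 1) else 0) =
      (if row + 1 < M then aGet matrix col (row + 1) else 0) := by
    rw [show col + 0 = col from by ring]
    exact if_congr (by omega) rfl rfl
  have g4 : (if 0 ≤ col + -1 ∧ col + -1 < N ∧ 0 ≤ row + 0 ∧ row + 0 < M then
        aGet matrix (col + -1) (row + 0) else 0) =
      (if 1 ≤ col then aGet matrix (col - 1) row else 0) := by
    rw [show col + -1 = col - 1 from by ring, show row + 0 = row from by ring]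
    exact if_congr (by omega) rfl rfl
  have g5 : (if 0 ≤ col + 1 ∧ col + 1 < N ∧ 0 ≤ row + 0 ∧ row + 0 < M then
        aGet matrix (col + 1) (row + 0) else 0) =
      (if col + 1 < N then aGet matrix (col + 1) row else 0) := by
    rw [show row + 0 = row from by ring]
    exact if_congr (by omega) rfl rfl
  rw [g2, g3, g4, g5]
  ring

-- ===== VERDICT =====
theorem ballon_pang2_spec : Claim_equal_ballon_pang2 := by
  intro N M matrix _ hPre
  show ballon_pang2 N M matrix = ballon_pang2_alt N M matrix
  unfold ballon_pang2 ballon_pang2_alt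
  by_cases h0 : N ≤ 0 ∨ M ≤ 0
  · rw [if_pos h0]
    rcases h0 with hN0 | hM0
    · rw [PySem.List.pyRange_one_eq_nil (a := 0) (b := N) (by omega)]; rfl
    · rw [PySem.List.foldl_congr_mem _ _ (fun acc _ => acc) 0 ?_]
      · exact List.foldl_fixed _
      · intro acc x hx
        simp only []
        rw [PySem.List.pyRange_one_eq_nil (a := 0) (b := M) (by omega)]
        rfl
  · rw [if_neg h0]
    obtain ⟨h1, h2⟩ := hPre (by omega)
    apply PySem.List.foldl_congr_mem
    intro acc col hcol
    obtain ⟨hc, hcN⟩ := PySem.List.mem_pyRange_one.1 hcol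
    apply PySem.List.foldl_congr_mem
    intro acc2 row hrow
    obtain ⟨hr, hrM⟩ := PySem.List.mem_pyRange_one.1 hrow
    simp only []
    rw [pollen_eq N M matrix h1 h2 col row hc hcN hr hrM,
      CP_get N M matrix row hr hrM, RP_get N M matrix col hc hcN]
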